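-- pv_equiv track=rewrite | github.com/atsss/nyu_deep_learning | examples/tests/autify/02.py | featuredProduct
-- ===== SOURCE A (Python) =====
-- from collections import Counter
--
-- def featuredProduct(products):
--     counter = Counter(products)
--     count = 0
--     ans = []
--
--     for key, value in counter.items():
--         if value > count:
--             count = value
--             ans = []
--             ans.append(key)
--         elif value == count:
--             ans.append(key)
--
--     return sorted(ans)[-1]
-- ===== SOURCE B (Python) =====
-- from collections import Counter
--
-- def featuredProduct(products):
--     counter = Counter(products)
--     common = counter.most_common()
--     top = common[0][1]
--     return max(k for k, v in common if v == top)
-- ===== Notes on version B (the rewrite author's own statement) =====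
-- stated objective: idiomatic
-- what changed: replaces A's manual one-pass max-count tracking with Counter.most_common() (sort by count descending), then filters the keys with the top count and takes their max, instead of accumulating a tie list and sorting it
import Mathlib
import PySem

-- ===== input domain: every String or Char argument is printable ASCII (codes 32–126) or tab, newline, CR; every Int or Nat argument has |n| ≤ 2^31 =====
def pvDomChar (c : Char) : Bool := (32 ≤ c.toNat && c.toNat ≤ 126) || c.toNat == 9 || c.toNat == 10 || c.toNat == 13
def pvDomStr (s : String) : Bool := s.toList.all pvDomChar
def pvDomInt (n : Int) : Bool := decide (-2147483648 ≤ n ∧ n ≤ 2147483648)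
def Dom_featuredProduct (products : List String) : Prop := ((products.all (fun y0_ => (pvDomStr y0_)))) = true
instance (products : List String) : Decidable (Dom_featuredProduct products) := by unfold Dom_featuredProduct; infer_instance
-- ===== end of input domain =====

-- B replaces A's manual max-count tracking loop with most_common() (sort items by count,
-- descending), then filters the keys holding the top count and takes their max; same cost, more idiomatic.


-- ===== PORT A =====
def featuredProduct (products : List String) : String :=
  let counter := PySem.Dict.counter products
  let st := counter.items.foldl
    (fun (s : Int × List String) kv =>
      if s.1 < kv.2 then (kv.2, [kv.1])
      else if kv.2 = s.1 then (s.1, s.2 ++ [kv.1])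
      else s) (0, [])
  ((PySem.List.pyGet? (PySem.List.sorted st.2 (fun x => x) false) (-1))).getD ""   -- none = IndexError, excluded by Pre_

-- ===== PORT B =====
def featuredProduct_alt (products : List String) : String :=
  let counter := PySem.Dict.counter products
  let common := PySem.List.sorted counter.items (fun kv => kv.2) true   -- most_common()
  match common with
  | [] => ""                                                            -- common[0] = IndexError, excluded by Pre_
  | c0 :: _ =>
    (PySem.List.max? ((common.filter (fun kv => kv.2 = c0.2)).map (·.1)) (fun x => x)).getD ""

-- ===== PRECONDITION & SPEC =====
-- Pre_ excludes only the empty list, on which both Pythons raise IndexError.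
def Pre_featuredProduct (products : List String) : Prop := products ≠ []
instance (products : List String) : Decidable (Pre_featuredProduct products) := by unfold Pre_featuredProduct; infer_instance
def pvWitness_featuredProduct : List String := (["a"])
def Spec_featuredProduct (products : List String) (out : String) : Prop := out = featuredProduct_alt products
instance (products : List String) (out : String) : Decidable (Spec_featuredProduct products out) := by unfold Spec_featuredProduct; infer_instance

-- ===== CLAIM (what is proved, stated in full; the proofs are below) =====
def Claim_equal_featuredProduct : Prop := ∀ (products : List String), Dom_featuredProduct products → Pre_featuredProduct products → Spec_featuredProduct products (featuredProduct products)

-- ===== LEMMAS AND PROOFS =====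

-- running maximum of the counts (the `count` variable of A's loop)
def pvMaxv (l : List (String × Int)) : Int := l.foldl (fun m kv => max m kv.2) 0

theorem pvMaxv_le (l : List (String × Int)) : (0 ≤ pvMaxv l) ∧ ∀ kv ∈ l, kv.2 ≤ pvMaxv l := by
  have h := PySem.List.le_foldl_max (l.map (·.2)) 0
  rw [List.foldl_map] at h
  exact ⟨h.1, fun kv hkv => h.2 kv.2 (List.mem_map_of_mem hkv)⟩

theorem pvMaxv_append (t : List (String × Int)) (a : String × Int) :
    pvMaxv (t ++ [a]) = max (pvMaxv t) a.2 := by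
  simp [pvMaxv]

-- A's loop computes the max count together with (in order) the keys attaining it
theorem foldA (l : List (String × Int)) :
    l.foldl (fun (s : Int × List String) kv =>
      if s.1 < kv.2 then (kv.2, [kv.1])
      else if kv.2 = s.1 then (s.1, s.2 ++ [kv.1])
      else s) (0, []) = (pvMaxv l, (l.filter (fun kv => kv.2 = pvMaxv l)).map (·.1)) := by
  induction l using List.reverseRecOn with
  | nil => simp [pvMaxv]
  | append_singleton t a ih =>
    have hle := (pvMaxv_le t).2
    rw [List.foldl_append, ih, pvMaxv_append]
    rcases lt_trichotomy (pvMaxv t) a.2 with hlt | heq | hgt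
    · have hmax : max (pvMaxv t) a.2 = a.2 := max_eq_right hlt.le
      have hfilt : t.filter (fun kv => kv.2 = a.2) = [] := by
        rw [List.filter_eq_nil_iff]
        intro kv hkv
        simp only [decide_eq_true_eq]
        exact fun hc => absurd hlt (by rw [← hc]; exact not_lt.2 (hle kv hkv))
      simp [hlt, hmax, hfilt]
    · have hmax : max (pvMaxv t) a.2 = pvMaxv t := by omega
      simp [heq, List.filter_append]
    · have hmax : max (pvMaxv t) a.2 = pvMaxv t := by omega
      simp [hmax, List.filter_append, not_lt.2 hgt.le, hgt.ne]

-- xs[-1] is the last element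
theorem pyGet_neg_one (l : List String) (h : l ≠ []) : PySem.List.pyGet? l (-1) = some (l.getLast h) := by
  have hl : 0 < l.length := List.length_pos_iff.2 h
  simp only [PySem.List.pyGet?, PySem.List.pyIdx?]
  rw [if_neg (by omega), if_pos (by omega)]
  simp only [Option.bind_some]
  rw [List.getElem?_eq_getElem (by omega)]
  congr 1
  rw [List.getLast_eq_getElem]
  congr 1

theorem le_getLast_of_pairwise (l : List String) (h : l.Pairwise (· ≤ ·)) (hne : l ≠ [])
    (y : String) (hy : y ∈ l) : y ≤ l.getLast hne := by
  induction l with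
  | nil => simp at hne
  | cons a t ih =>
    rcases List.mem_cons.1 hy with rfl | hy'
    · rcases eq_or_ne t [] with rfl | ht
      · simp
      · calc y ≤ t.getLast ht := (List.pairwise_cons.1 h).1 _ (List.getLast_mem ht)
             _ = (y :: t).getLast hne := (List.getLast_cons ht).symm
    · have ht : t ≠ [] := List.ne_nil_of_mem hy'
      rw [List.getLast_cons ht]
      exact ih (List.pairwise_cons.1 h).2 ht hy'

theorem pvMaxv_le_bound (l : List (String × Int)) (b : Int) (h0 : 0 ≤ b)
    (h : ∀ kv ∈ l, kv.2 ≤ b) : pvMaxv l ≤ b := by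
  unfold pvMaxv
  suffices H : ∀ a : Int, a ≤ b → l.foldl (fun m kv => max m kv.2) a ≤ b by exact H 0 h0
  induction l with
  | nil => intro a ha; simpa using ha
  | cons x t ih =>
    intro a ha
    simp only [List.foldl_cons]
    exact ih (fun kv hkv => h kv (List.mem_cons_of_mem _ hkv)) _
      (max_le ha (h x List.mem_cons_self))

theorem featuredProduct_main (products : List String) (hpre : products ≠ []) :
    featuredProduct products = featuredProduct_alt products := by
  unfold featuredProduct featuredProduct_alt
  simp only [foldA]
  set items := (PySem.Dict.counter products).items with hitems
  have hitemsne : items ≠ [] := by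
    rcases products with _ | ⟨p, ps⟩
    · exact absurd rfl hpre
    · rw [hitems, PySem.Dict.items_counter]
      intro hc
      have : p ∈ PySem.Set.ofList (p :: ps) := (PySem.Set.mem_ofList _ _).2 List.mem_cons_self
      simp [List.map_eq_nil_iff.1 hc] at this
  have hcne : PySem.List.sorted items (fun kv => kv.2) true ≠ [] := by
    rw [Ne, PySem.List.sorted_eq_nil_iff]; exact hitemsne
  rcases hcommon : PySem.List.sorted items (fun kv => kv.2) true with _ | ⟨c0, rest⟩
  · exact absurd hcommon hcne
  have hhead : ∀ y ∈ items, y.2 ≤ c0.2 := PySem.List.key_head_sorted_rev_ge items _ hcommon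
  have hperm : (c0 :: rest).Perm items := hcommon ▸ PySem.List.sorted_perm items _ true
  have hc0mem : c0 ∈ items := hperm.mem_iff.1 List.mem_cons_self
  have hc0nn : 0 ≤ c0.2 := by
    rw [hitems, PySem.Dict.items_counter] at hc0mem
    rcases List.mem_map.1 hc0mem with ⟨k, _, hk⟩
    rw [← hk]; positivity
  have hMv : pvMaxv items = c0.2 :=
    le_antisymm (pvMaxv_le_bound items c0.2 hc0nn hhead)
      ((pvMaxv_le items).2 c0 hc0mem)
  set LA := (items.filter (fun kv => kv.2 = pvMaxv items)).map (·.1) with hLA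
  set LB := ((c0 :: rest).filter (fun kv => kv.2 = c0.2)).map (·.1) with hLB
  have hpermL : LB.Perm LA := by
    rw [hLA, hLB, hMv]
    exact (hperm.filter _).map _
  have hc0LB : c0.1 ∈ LB := by
    rw [hLB]
    exact List.mem_map_of_mem (List.mem_filter.2 ⟨List.mem_cons_self, by simp⟩)
  have hLAne : LA ≠ [] := by
    intro hc; rw [hc] at hpermL; exact (List.ne_nil_of_mem hc0LB) hpermL.eq_nil
  have hsne : PySem.List.sorted LA (fun x => x) false ≠ [] := by
    rw [Ne, PySem.List.sorted_eq_nil_iff]; exact hLAne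
  rw [pyGet_neg_one _ hsne]
  set s := PySem.List.sorted LA (fun x => x) false with hs
  rcases hm : PySem.List.max? LB (fun x => x) with _ | m
  · exact absurd ((PySem.List.max?_eq_none_iff _ _).1 hm) (List.ne_nil_of_mem hc0LB)
  have hmmem : m ∈ LB := PySem.List.max?_mem hm
  have hmmax : ∀ y ∈ LB, y ≤ m := PySem.List.max?_isMax hm
  have hspermLA : s.Perm LA := PySem.List.sorted_perm LA _ false
  have hpair : s.Pairwise (· ≤ ·) := PySem.List.sorted_pairwise LA (fun x => x)
  have h1 : s.getLast hsne ≤ m :=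
    hmmax _ (hpermL.mem_iff.2 (hspermLA.mem_iff.1 (List.getLast_mem hsne)))
  have h2 : m ≤ s.getLast hsne :=
    le_getLast_of_pairwise s hpair hsne m (hspermLA.mem_iff.2 (hpermL.mem_iff.1 hmmem))
  show (some (s.getLast hsne)).getD "" = (PySem.List.max? LB (fun x => x)).getD ""
  rw [hm, Option.getD_some, Option.getD_some]
  exact le_antisymm h1 h2

-- ===== VERDICT (by name: the statement is the Claim_ definition above) =====
theorem featuredProduct_spec : Claim_equal_featuredProduct := by
  intro products _ hpre
  exact featuredProduct_main products hpre
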